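-- pv_equiv track=rewrite | github.com/EricZoop/ubxview-app | data/drone/trackstat.py | segment_into_flights
-- ===== SOURCE A (Python) =====
-- from typing import List, Dict, Union
--
-- FLIGHT_GAP_SECONDS = 120
--
-- def segment_into_flights(points: List[Dict]) -> List[List[Dict]]:
--     """
--     Segments a list of time-sorted GPS points into distinct flights
--     based on a time gap threshold.
--     """
--     if not points:
--         return []
--
--     # The master list that will hold each flight (which is a list of points)
--     all_flights = []
--
--     # Start the first flight with the first point
--     current_flight = [points[0]]
--
--     for i in range(1, len(points)):
--         prev_point = points[i-1]
--         current_point = points[i]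
--
--         time_diff = current_point['time'] - prev_point['time']
--
--         # Handle midnight wrap-around
--         if time_diff < 0:
--             time_diff += 86400
--
--         # If the gap is too large, end the current flight and start a new one
--         if time_diff > FLIGHT_GAP_SECONDS:
--             all_flights.append(current_flight)
--             current_flight = [current_point] # Start the new flight
--         else:
--             current_flight.append(current_point) # Continue the current flight
--
--     # Don't forget to add the last flight to the list
--     all_flights.append(current_flight)
--
--     return all_flights
-- ===== SOURCE B (Python) =====
-- FLIGHT_GAP_SECONDS = 120
--
-- def segment_into_flights(points):
--     """Outer loop per flight: an inner scan advances j to the end of the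
--     current flight, then the flight is emitted as the slice points[i:j]."""
--     flights = []
--     n = len(points)
--     i = 0
--     while i < n:
--         j = i + 1
--         while j < n:
--             d = points[j]['time'] - points[j - 1]['time']
--             if d < 0:
--                 d += 86400
--             if d > FLIGHT_GAP_SECONDS:
--                 break
--             j += 1
--         flights.append(points[i:j])
--         i = j
--     return flights
-- ===== Notes on version B (the rewrite author's own statement) =====
-- stated objective: alternative
-- what changed: Replaced the single accumulator pass (growing a current_flight list and flushing it on each gap) by a nested scan: an outer loop per flight whose inner loop advances an index to the flight's end, emitting each flight as one slice points[i:j].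
import Mathlib
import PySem

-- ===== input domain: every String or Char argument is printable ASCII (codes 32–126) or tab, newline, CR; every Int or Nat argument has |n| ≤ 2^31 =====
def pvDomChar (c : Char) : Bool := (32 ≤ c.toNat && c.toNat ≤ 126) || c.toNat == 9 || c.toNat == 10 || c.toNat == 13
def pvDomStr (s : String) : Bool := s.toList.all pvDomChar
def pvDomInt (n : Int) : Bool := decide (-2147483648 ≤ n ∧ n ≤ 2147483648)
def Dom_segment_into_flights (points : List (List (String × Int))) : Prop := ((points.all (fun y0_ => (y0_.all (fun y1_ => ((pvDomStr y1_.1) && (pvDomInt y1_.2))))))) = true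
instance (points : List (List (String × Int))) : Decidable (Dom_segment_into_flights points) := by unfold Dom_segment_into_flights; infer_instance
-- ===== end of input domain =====

-- B replaces A's accumulator pass by an outer loop per flight with an inner scan emitting slices (alternative decomposition, same cost).


-- shared helpers (both Pythons compute p['time'] and the wrap-corrected gap identically)
-- dict lookup p['time'] = first match; default 0 is never used under Pre_ (key present)
def pvTime (p : List (String × Int)) : Int := (List.lookup "time" p).getD 0

def pvGap (p q : List (String × Int)) : Int :=
  let d := pvTime q - pvTime p
  if d < 0 then d + 86400 else d

-- gap between points[k-1] and points[k]; indices are nonnegative and in range wherever used, so getD is exact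
def pvGapAt (points : List (List (String × Int))) (k : Nat) : Int :=
  pvGap (points.getD (k-1) []) (points.getD k [])

-- ===== PORT A =====
def pvStepA (points : List (List (String × Int)))
    (st : List (List (List (String × Int))) × List (List (String × Int))) (i : Int) :
    List (List (List (String × Int))) × List (List (String × Int)) :=
  let prev := PySem.List.pyGetD points (i - 1) []
  let cur := PySem.List.pyGetD points i []
  let d := pvGap prev cur
  if d > 120 then (st.1 ++ [st.2], [cur]) else (st.1, st.2 ++ [cur])

def segment_into_flights (points : List (List (String × Int))) : List (List (List (String × Int))) :=
  match points with
  | [] => []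
  | p0 :: _ =>
    let st := (PySem.List.pyRange 1 points.length 1).foldl (pvStepA points)
      (([] : List (List (List (String × Int)))), [p0])
    st.1 ++ [st.2]

-- ===== PORT B =====
def pvInner (points : List (List (String × Int))) (n j : Nat) : Nat :=
  if _ : j < n then
    if pvGapAt points j > 120 then j else pvInner points n (j+1)
  else j
termination_by n - j

theorem pvInner_ge (points : List (List (String × Int))) (n j : Nat) : j ≤ pvInner points n j := by
  fun_induction pvInner points n j with
  | case1 j h hg => omega
  | case2 j h hg ih => omega
  | case3 j h => omega

def pvOuter (points : List (List (String × Int))) (n i : Nat) : List (List (List (String × Int))) :=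
  if h : i < n then
    let j := pvInner points n (i+1)
    PySem.List.slice points (some (i : Int)) (some (j : Int)) :: pvOuter points n j
  else []
termination_by n - i
decreasing_by
  have := pvInner_ge points n (i+1); omega

def segment_into_flights_alt (points : List (List (String × Int))) : List (List (List (String × Int))) :=
  pvOuter points points.length 0

-- ===== PRECONDITION & SPEC =====
-- Pre_: whenever two or more points exist, every point carries the 'time' key (otherwise Python A raises KeyError).
def Pre_segment_into_flights (points : List (List (String × Int))) : Prop :=
  2 ≤ points.length → ∀ p ∈ points, (List.lookup "time" p).isSome = true
instance (points : List (List (String × Int))) : Decidable (Pre_segment_into_flights points) := by unfold Pre_segment_into_flights; infer_instance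

def pvWitness_segment_into_flights : (List (List (String × Int))) :=
  [[("time", 0)], [("time", 50)], [("time", 400)]]

def Spec_segment_into_flights (points : List (List (String × Int))) (out : List (List (List (String × Int)))) : Prop := out = segment_into_flights_alt points
instance (points : List (List (String × Int))) (out : List (List (List (String × Int)))) : Decidable (Spec_segment_into_flights points out) := by unfold Spec_segment_into_flights; infer_instance

-- ===== CLAIM (what is proved, stated in full; the proofs are below) =====
def Claim_equal_segment_into_flights : Prop := ∀ (points : List (List (String × Int))), Dom_segment_into_flights points → Pre_segment_into_flights points → Spec_segment_into_flights points (segment_into_flights points)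

-- ===== LEMMAS AND PROOFS =====

theorem pvInner_eq_of_nogap (points : List (List (String × Int))) (n j : Nat)
    (hj : j ≤ n) (hng : ∀ k, j ≤ k → k < n → ¬ (pvGapAt points k > 120)) :
    pvInner points n j = n := by
  fun_induction pvInner points n j with
  | case1 j h hg =>
    exact absurd hg (hng j (le_refl j) h)
  | case2 j h hg ih =>
    exact ih (by omega) (fun k hk1 hk2 => hng k (by omega) hk2)
  | case3 j h => omega

theorem pvInner_stop (points : List (List (String × Int))) (n j m : Nat)
    (hjm : j ≤ m) (hmn : m < n)
    (hng : ∀ k, j ≤ k → k < m → ¬ (pvGapAt points k > 120))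
    (hg : pvGapAt points m > 120) :
    pvInner points n j = m := by
  fun_induction pvInner points n j with
  | case1 j h hgj =>
    by_cases hjm' : j = m
    · exact hjm'
    · exact absurd hgj (hng j (le_refl j) (by omega))
  | case2 j h hgj ih =>
    have hjne : j ≠ m := fun he => hgj (he ▸ hg)
    exact ih (by omega) (fun k hk1 hk2 => hng k (by omega) hk2)
  | case3 j h => omega

theorem foldA_eq (points : List (List (String × Int))) (t : Nat) :
    ∀ (m prev : Nat) (F : List (List (List (String × Int)))),
    points.length - m = t → prev < m → m ≤ points.length →
    (∀ k, prev < k → k < m → ¬ (pvGapAt points k > 120)) →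
    ((PySem.List.pyRange (m : Int) points.length 1).foldl (pvStepA points)
        (F, (points.drop prev).take (m - prev))).1 ++
      [((PySem.List.pyRange (m : Int) points.length 1).foldl (pvStepA points)
        (F, (points.drop prev).take (m - prev))).2] = F ++ pvOuter points points.length prev := by
  induction t with
  | zero =>
    intro m prev F ht hpm hmn hng
    have hm : m = points.length := by omega
    subst hm
    rw [PySem.List.pyRange_one_eq_nil (by omega)]
    simp only [List.foldl_nil]
    rw [pvOuter]
    simp only [dif_pos (show prev < points.length by omega)]
    have hin : pvInner points points.length (prev + 1) = points.length :=
      pvInner_eq_of_nogap points points.length (prev + 1) (by omega)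
        (fun k hk1 hk2 => hng k (by omega) hk2)
    rw [hin, pvOuter]
    simp only [dif_neg (lt_irrefl points.length)]
    rw [PySem.List.slice_natCast]
  | succ t ih =>
    intro m prev F ht hpm hmn hng
    have hmn' : m < points.length := by omega
    rw [PySem.List.pyRange_one_cons (by exact_mod_cast hmn')]
    simp only [List.foldl_cons]
    have hm1 : (m : Int) - 1 = ((m - 1 : Nat) : Int) := by omega
    have hstep : pvStepA points (F, (points.drop prev).take (m - prev)) (m : Int) =
        if pvGapAt points m > 120 then
          (F ++ [(points.drop prev).take (m - prev)], [points.getD m []])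
        else (F, (points.drop prev).take (m - prev) ++ [points.getD m []]) := by
      simp only [pvStepA, hm1, PySem.List.pyGetD_natCast, pvGapAt]
      rfl
    by_cases hg : pvGapAt points m > 120
    · rw [hstep, if_pos hg]
      have hsingle : [points.getD m []] = (points.drop m).take (m + 1 - m) := by
        have h1 : m + 1 - m = 1 := by omega
        rw [h1, List.drop_eq_getElem_cons hmn', List.take_one]
        simp [List.getD, List.getElem?_eq_getElem hmn']
      rw [hsingle]
      have hcast : (m : Int) + 1 = ((m + 1 : Nat) : Int) := by push_cast; ring
      rw [hcast]
      rw [ih (m + 1) m (F ++ [(points.drop prev).take (m - prev)]) (by omega) (by omega)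
        (by omega) (fun k hk1 hk2 => by omega)]
      conv_rhs => rw [pvOuter]
      simp only [dif_pos (show prev < points.length by omega)]
      have hin : pvInner points points.length (prev + 1) = m :=
        pvInner_stop points points.length (prev + 1) m (by omega) hmn'
          (fun k hk1 hk2 => hng k (by omega) hk2) hg
      rw [hin, PySem.List.slice_natCast]
      simp
    · rw [hstep, if_neg hg]
      have hext : (points.drop prev).take (m - prev) ++ [points.getD m []] =
          (points.drop prev).take (m + 1 - prev) := by
        have h1 : m + 1 - prev = (m - prev) + 1 := by omega
        rw [h1, List.take_add_one]
        have h2 : (points.drop prev)[m - prev]? = some points[m] := by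
          rw [List.getElem?_drop]
          rw [List.getElem?_eq_getElem (by omega : prev + (m - prev) < points.length)]
          congr 1
          congr 1
          omega
        rw [h2]
        simp [List.getD, List.getElem?_eq_getElem hmn']
      rw [hext]
      have hcast : (m : Int) + 1 = ((m + 1 : Nat) : Int) := by push_cast; ring
      rw [hcast]
      exact ih (m + 1) prev F (by omega) (by omega) (by omega)
        (fun k hk1 hk2 => by
          by_cases hkm : k = m
          · exact hkm ▸ hg
          · exact hng k hk1 (by omega))

-- ===== VERDICT (by name: the statement is the Claim_ definition above) =====
theorem segment_into_flights_spec : Claim_equal_segment_into_flights := by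
  intro points _ _
  unfold Spec_segment_into_flights segment_into_flights segment_into_flights_alt
  match points with
  | [] =>
    rw [pvOuter]
    simp
  | p0 :: rest =>
    have h := foldA_eq (p0 :: rest) ((p0 :: rest).length - 1) 1 0 []
      rfl (by omega) (by simp) (fun k hk1 hk2 => by omega)
    simp only [List.drop_zero, Nat.sub_zero, List.take_one, List.head?, Option.toList] at h
    simpa using h
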